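-- pv_equiv track=rewrite | github.com/ethanski22/UC_Python_Programming_Course | Challenges/PythonChallenge3.py | longest_ladder
-- ===== SOURCE A (Python) =====
-- def longest_ladder(words):
--     # Create a dictionary to store words indexed by their sorted form
--     word_dict = {}
--     for w in words:
--         sorted_w = ''.join(sorted(w))
--         if sorted_w not in word_dict:
--             word_dict[sorted_w] = []
--         word_dict[sorted_w].append(w)
--
--     def dfs(word, visited):
--         visited.add(word)
--         max_ladder = [word]
--         sorted_word = ''.join(sorted(word))
--         for char in 'ABCDEFGHIJKLMNOPQRSTUVWXYZ':
--             new_word = sorted_word + char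
--             if new_word in word_dict:
--                 for next_word in word_dict[new_word]:
--                     if next_word not in visited:
--                         ladder = dfs(next_word, visited)
--                         if len(ladder) > len(max_ladder):
--                             max_ladder = ladder
--         visited.remove(word)
--         return [word] + max_ladder
--
--     # Find the longest k-ladder
--     longest_ladder = []
--     visited = set()
--     for word in words:
--         if word not in visited:
--             ladder = dfs(word, visited)
--             if len(ladder) > len(longest_ladder):
--                 longest_ladder = ladder
--
--     return longest_ladder
-- ===== SOURCE B (Python) =====
-- def longest_ladder(words):
--     # Group words by their sorted letter multiset (the same grouping A builds).
--     groups = {}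
--     for w in words:
--         groups.setdefault(''.join(sorted(w)), []).append(w)
--
--     # Bottom-up DP over the length-layered DAG: process words longest-first, so
--     # best[x] is already known for every successor x (len(x) == len(w) + 1).
--     best = {}
--     for w in sorted(words, key=len, reverse=True):
--         sw = ''.join(sorted(w))
--         ladder = [w]
--         for ch in 'ABCDEFGHIJKLMNOPQRSTUVWXYZ':
--             for nx in groups.get(sw + ch, ()):
--                 cand = best[nx]
--                 if len(cand) > len(ladder):
--                     ladder = cand
--         best[w] = [w] + ladder
--
--     result = []
--     for w in words:
--         if len(best[w]) > len(result):
--             result = best[w]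
--     return result
-- ===== Notes on version B (the rewrite author's own statement) =====
-- stated objective: alternative
-- what changed: Replaced A's recursive DFS (which re-explores ladder suffixes from every starting word) by a bottom-up dynamic program over words sorted longest-first, computing each word's best ladder once from its already-computed successors.
import Mathlib
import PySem

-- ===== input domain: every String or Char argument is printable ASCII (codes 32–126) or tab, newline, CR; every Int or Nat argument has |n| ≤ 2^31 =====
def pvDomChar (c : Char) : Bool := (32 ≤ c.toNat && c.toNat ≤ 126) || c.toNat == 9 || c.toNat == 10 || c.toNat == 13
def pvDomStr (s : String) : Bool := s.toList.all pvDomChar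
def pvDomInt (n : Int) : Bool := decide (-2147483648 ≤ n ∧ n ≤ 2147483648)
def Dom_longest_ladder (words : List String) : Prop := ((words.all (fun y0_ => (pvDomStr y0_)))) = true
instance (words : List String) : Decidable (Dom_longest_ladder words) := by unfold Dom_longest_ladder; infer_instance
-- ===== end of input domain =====

-- B replaces A's recursive DFS by a bottom-up DP over words sorted longest-first (objective: alternative algorithm, same observable behaviour).


-- ===== PORT A =====
-- ''.join(sorted(w)) is used only as a dict key and for key concatenation; it is
-- represented exactly by its character list (BEq on List Char = string equality).
def pvKey (w : String) : List Char := PySem.List.sorted w.toList (fun c => c) false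

def pvAlphabet : List Char := "ABCDEFGHIJKLMNOPQRSTUVWXYZ".toList

-- A's grouping loop: `if sorted_w not in word_dict: word_dict[sorted_w] = []` then append.
def pvBuildA (words : List String) : PySem.Dict (List Char) (List String) :=
  words.foldl (fun d w =>
    let k := pvKey w
    let d := if d.contains k then d else d.insert k ([] : List String)
    d.modify k [] (fun g => g ++ [w])) PySem.Dict.empty

-- fuel bound for the guarded recursion (a totality guard only: the recursion depth is
-- bounded by the maximal word length, proved in the lemmas below).
def pvMaxLen (words : List String) : Nat :=
  words.foldl (fun m w => max m w.toList.length) 0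

-- dfs(word, visited).  Python's dfs restores `visited` to its entry value before
-- returning (add then remove), so the shared mutable set is passed functionally.
def pvDfsA (dict : PySem.Dict (List Char) (List String)) :
    Nat → String → PySem.Set String → List String
  | 0, word, _ => [word] ++ [word]  -- fuel exhausted: unreachable at the fuel longest_ladder supplies
  | fuel+1, word, visited =>
    let visited := PySem.Set.add visited word
    let sw := pvKey word
    let maxLadder := pvAlphabet.foldl (fun ml ch =>
      match dict.get? (sw ++ [ch]) with
      | none => ml
      | some group =>
        group.foldl (fun ml nextWord =>
          if PySem.Set.contains visited nextWord then ml
          else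
            let ladder := pvDfsA dict fuel nextWord visited
            if ml.length < ladder.length then ladder else ml) ml) [word]
    [word] ++ maxLadder

def longest_ladder (words : List String) : List String :=
  let word_dict := pvBuildA words
  let fuel := pvMaxLen words + 2
  (words.foldl (fun (st : List String × PySem.Set String) word =>
      if PySem.Set.contains st.2 word then st
      else
        let ladder := pvDfsA word_dict fuel word st.2
        if st.1.length < ladder.length then (ladder, st.2) else (st.1, st.2))
    (([] : List String), PySem.Set.empty)).1

-- ===== PORT B =====
-- B's grouping: groups.setdefault(k, []).append(w)  ==  groups[k] = groups.get(k, []) + [w].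
def pvGroupB (words : List String) : PySem.Dict (List Char) (List String) :=
  words.foldl (fun d w => d.modify (pvKey w) [] (fun g => g ++ [w])) PySem.Dict.empty

-- one iteration of B's DP loop; `best[nx]` is total in Python because every successor
-- nx is strictly longer and hence already processed (established by the lemmas below).
def pvStepB (groups : PySem.Dict (List Char) (List String))
    (best : PySem.Dict String (List String)) (w : String) :
    PySem.Dict String (List String) :=
  let sw := pvKey w
  let ladder := pvAlphabet.foldl (fun lad ch =>
      (groups.getD (sw ++ [ch]) []).foldl (fun lad nx =>
        let cand := best.getD nx []
        if lad.length < cand.length then cand else lad) lad) [w]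
  best.insert w ([w] ++ ladder)

def longest_ladder_alt (words : List String) : List String :=
  let groups := pvGroupB words
  let best := (PySem.List.sorted words (fun w => (PySem.Str.len w : Int)) true).foldl
      (pvStepB groups) PySem.Dict.empty
  words.foldl (fun res w =>
    let l := best.getD w []
    if res.length < l.length then l else res) []

-- ===== PRECONDITION & SPEC =====
def Spec_longest_ladder (words : List String) (out : List String) : Prop := out = longest_ladder_alt words
instance (words : List String) (out : List String) : Decidable (Spec_longest_ladder words out) := by unfold Spec_longest_ladder; infer_instance

-- ===== CLAIM (what is proved, stated in full; the proofs are below) =====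
def Claim_equal_longest_ladder : Prop := ∀ (words : List String), Dom_longest_ladder words → Spec_longest_ladder words (longest_ladder words)

-- ===== LEMMAS AND PROOFS =====

def pvGrp (words : List String) (k : List Char) : List String :=
  words.filter (fun w => pvKey w == k)

theorem pvMem_pvGrp {words : List String} {k : List Char} {x : String}
    (h : x ∈ pvGrp words k) : x ∈ words ∧ pvKey x = k := by
  unfold pvGrp at h
  simp [List.mem_filter] at h
  exact h

theorem pvLen_pvKey (w : String) : (pvKey w).length = w.toList.length := by
  unfold pvKey
  exact PySem.List.length_sorted _ _ _

theorem pvLe_maxLen {words : List String} {w : String} (h : w ∈ words) :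
    w.toList.length ≤ pvMaxLen words := by
  exact (PySem.List.le_foldl_max_nat words (fun w => w.toList.length) 0).2 w h

theorem pvGroupB_getD (words : List String) (k : List Char) :
    (pvGroupB words).getD k [] = pvGrp words k := by
  unfold pvGroupB pvGrp
  have h : words.foldl (fun d w => d.modify (pvKey w) [] (fun g => g ++ [w])) PySem.Dict.empty
      = (words.map (fun w => (pvKey w, w))).foldl (fun d p => d.modify p.1 [] (fun g => g ++ [p.2])) PySem.Dict.empty := by
    rw [List.foldl_map]
  rw [h, PySem.Dict.getD_foldl_modify_append]
  simp [List.filter_map, Function.comp_def]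

theorem pvStepA_getD (d : PySem.Dict (List Char) (List String)) (w : String) (k : List Char) :
    ((if d.contains (pvKey w) then d else d.insert (pvKey w) ([] : List String)).modify
        (pvKey w) [] (fun g => g ++ [w])).getD k [] =
      (d.modify (pvKey w) [] (fun g => g ++ [w])).getD k [] := by
  by_cases hc : d.contains (pvKey w)
  · simp [hc]
  · have hc' : d.contains (pvKey w) = false := by simpa using hc
    simp only [hc, if_neg, Bool.false_eq_true, not_false_iff]
    rw [PySem.Dict.getD_modify, PySem.Dict.getD_modify]
    by_cases hk : k = pvKey w
    · rw [if_pos hk, if_pos hk, PySem.Dict.getD_insert, if_pos rfl,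
        PySem.Dict.getD_of_not_contains d _ hc']
    · rw [if_neg hk, if_neg hk, PySem.Dict.getD_insert, if_neg hk]

theorem pvBuildA_getD (words : List String) (k : List Char) :
    (pvBuildA words).getD k [] = pvGrp words k := by
  rw [← pvGroupB_getD]
  unfold pvBuildA pvGroupB
  suffices h : ∀ (l : List String) (d d' : PySem.Dict (List Char) (List String)),
      (∀ j, d.getD j [] = d'.getD j []) →
      ∀ j, (l.foldl (fun d w =>
          (if d.contains (pvKey w) then d else d.insert (pvKey w) ([] : List String)).modify
            (pvKey w) [] (fun g => g ++ [w])) d).getD j [] =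
        (l.foldl (fun d w => d.modify (pvKey w) [] (fun g => g ++ [w])) d').getD j [] by
    exact h words _ _ (fun _ => rfl) k
  intro l
  induction l with
  | nil => intro d d' hd j; exact hd j
  | cons w t ih =>
    intro d d' hd j
    simp only [List.foldl_cons]
    apply ih
    intro j
    rw [pvStepA_getD, PySem.Dict.getD_modify, PySem.Dict.getD_modify, hd (pvKey w)]
    by_cases hk : j = pvKey w
    · simp [hk]
    · rw [if_neg hk, if_neg hk, hd j]

theorem pvMatch_get? (d : PySem.Dict (List Char) (List String)) (k : List Char)
    (f : List String → String → List String) (ml : List String) :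
    (match d.get? k with
      | none => ml
      | some group => group.foldl f ml) = (d.getD k []).foldl f ml := by
  rw [PySem.Dict.getD_eq_get?_getD]
  cases h : d.get? k <;> simp

def pvIdeal (words : List String) : Nat → String → List String
  | 0, w => [w] ++ [w]
  | fuel+1, w =>
    [w] ++ pvAlphabet.foldl (fun ml ch =>
      (pvGrp words (pvKey w ++ [ch])).foldl (fun ml nx =>
        let lad := pvIdeal words fuel nx
        if ml.length < lad.length then lad else ml) ml) [w]

theorem pvSuccLen {words : List String} {w nx : String} {ch : Char}
    (h : nx ∈ pvGrp words (pvKey w ++ [ch])) :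
    nx ∈ words ∧ nx.toList.length = w.toList.length + 1 := by
  obtain ⟨hm, hk⟩ := pvMem_pvGrp h
  refine ⟨hm, ?_⟩
  have := congrArg List.length hk
  simpa [pvLen_pvKey] using this

theorem pvDfsA_eq_ideal (words : List String) :
    ∀ (fuel : Nat) (w : String) (visited : PySem.Set String),
    (∀ v ∈ visited, v.toList.length ≤ w.toList.length) →
    pvDfsA (pvBuildA words) fuel w visited = pvIdeal words fuel w := by
  intro fuel
  induction fuel with
  | zero => intro w visited _; rfl
  | succ fuel ih =>
    intro w visited hv
    show [w] ++ _ = [w] ++ _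
    congr 1
    apply PySem.List.foldl_congr_mem
    intro ml ch _
    rw [pvMatch_get?, pvBuildA_getD]
    apply PySem.List.foldl_congr_mem
    intro ml' nx hnx
    obtain ⟨hnw, hlen⟩ := pvSuccLen hnx
    have hnotmem : nx ∉ PySem.Set.add visited w := by
      rw [PySem.Set.mem_add]
      rintro (h | h)
      · have := hv nx h; omega
      · subst h; omega
    have hcf : PySem.Set.contains (PySem.Set.add visited w) nx = false := by
      rw [Bool.eq_false_iff]
      intro hc
      exact hnotmem ((PySem.Set.contains_iff _ _).mp hc)
    rw [hcf]
    simp only [Bool.false_eq_true, if_false]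
    rw [ih nx (PySem.Set.add visited w) ?_]
    intro v hvmem
    rcases (PySem.Set.mem_add visited w v).mp hvmem with h | h
    · have := hv v h; omega
    · subst h; omega

theorem pvIdeal_stable (words : List String) :
    ∀ (fuel fuel' : Nat) (w : String), w ∈ words →
    pvMaxLen words + 1 < w.toList.length + fuel →
    pvMaxLen words + 1 < w.toList.length + fuel' →
    pvIdeal words fuel w = pvIdeal words fuel' w := by
  intro fuel
  induction fuel with
  | zero =>
    intro fuel' w hw h _
    have := pvLe_maxLen hw
    omega
  | succ fuel ih =>
    intro fuel' w hw h h'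
    cases fuel' with
    | zero =>
      have := pvLe_maxLen hw
      omega
    | succ fuel' =>
      show [w] ++ _ = [w] ++ _
      congr 1
      apply PySem.List.foldl_congr_mem
      intro ml ch _
      apply PySem.List.foldl_congr_mem
      intro ml' nx hnx
      obtain ⟨hnw, hlen⟩ := pvSuccLen hnx
      rw [ih fuel' nx hnw (by omega) (by omega)]

theorem pvIdeal_succ (words : List String) (fuel : Nat) (w : String) :
    pvIdeal words (fuel + 1) w =
      [w] ++ pvAlphabet.foldl (fun ml ch =>
        (pvGrp words (pvKey w ++ [ch])).foldl (fun ml nx =>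
          let lad := pvIdeal words fuel nx
          if ml.length < lad.length then lad else ml) ml) [w] := rfl

theorem pvIdeal_unfold (words : List String) (w : String) :
    pvIdeal words (pvMaxLen words + 2) w =
      [w] ++ pvAlphabet.foldl (fun ml ch =>
        (pvGrp words (pvKey w ++ [ch])).foldl (fun ml nx =>
          let lad := pvIdeal words (pvMaxLen words + 2) nx
          if ml.length < lad.length then lad else ml) ml) [w] := by
  rw [show pvMaxLen words + 2 = (pvMaxLen words + 1) + 1 from rfl, pvIdeal_succ]
  refine congrArg (fun t => [w] ++ t) ?_
  apply PySem.List.foldl_congr_mem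
  intro ml ch _
  apply PySem.List.foldl_congr_mem
  intro ml' nx hnx
  obtain ⟨hnw, hlen⟩ := pvSuccLen hnx
  rw [pvIdeal_stable words (pvMaxLen words + 1) (pvMaxLen words + 2) nx hnw (by omega) (by omega)]

theorem pvFoldB (words : List String) :
    ∀ (l : List String) (best : PySem.Dict String (List String)),
    (∀ x ∈ l, x ∈ words) →
    l.Pairwise (fun a b => b.toList.length ≤ a.toList.length) →
    (∀ x ∈ words, x ∈ l ∨ best.getD x [] = pvIdeal words (pvMaxLen words + 2) x) →
    ∀ x ∈ words, (l.foldl (pvStepB (pvGroupB words)) best).getD x [] =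
      pvIdeal words (pvMaxLen words + 2) x := by
  intro l
  induction l with
  | nil =>
    intro best _ _ hinv x hx
    rcases hinv x hx with h | h
    · cases h
    · exact h
  | cons w t ih =>
    intro best hsub hpw hinv x hx
    simp only [List.foldl_cons]
    -- the value B stores for w is the ideal value
    have hwmem : w ∈ words := hsub w (List.mem_cons_self ..)
    have hladder : pvStepB (pvGroupB words) best w =
        best.insert w (pvIdeal words (pvMaxLen words + 2) w) := by
      unfold pvStepB
      dsimp only
      rw [pvIdeal_unfold words w]
      refine congrArg (best.insert w) (congrArg (fun t => [w] ++ t) ?_)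
      apply PySem.List.foldl_congr_mem
      intro ml ch _
      rw [pvGroupB_getD]
      apply PySem.List.foldl_congr_mem
      intro ml' nx hnx
      obtain ⟨hnw, hlen⟩ := pvSuccLen hnx
      -- nx is strictly longer than w and every element of t, hence not in w :: t
      have hbest : best.getD nx [] = pvIdeal words (pvMaxLen words + 2) nx := by
        rcases hinv nx hnw with h | h
        · rcases List.mem_cons.mp h with h | h
          · subst h; omega
          · have := (List.pairwise_cons.mp hpw).1 nx h; omega
        · exact h
      rw [hbest]
    rw [hladder]
    apply ih
    · intro y hy; exact hsub y (List.mem_cons_of_mem _ hy)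
    · exact (List.pairwise_cons.mp hpw).2
    · intro y hy
      rcases hinv y hy with h | h
      · rcases List.mem_cons.mp h with h | h
        · subst h
          right
          rw [PySem.Dict.getD_insert_self]
        · left; exact h
      · by_cases hyw : y = w
        · subst hyw
          right
          rw [PySem.Dict.getD_insert_self]
        · right
          rw [PySem.Dict.getD_insert_of_ne _ _ _ hyw, h]
    · exact hx

theorem pvContains_empty (x : String) :
    PySem.Set.contains (PySem.Set.empty : PySem.Set String) x = false := by
  rw [Bool.eq_false_iff]
  intro hc
  have := (PySem.Set.contains_iff _ _).mp hc
  simp [PySem.Set.empty] at this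

theorem pvPairFold (d : PySem.Dict (List Char) (List String)) (F : Nat) :
    ∀ (l : List String) (res : List String),
    (l.foldl (fun (st : List String × PySem.Set String) word =>
        if PySem.Set.contains st.2 word then st
        else
          let ladder := pvDfsA d F word st.2
          if st.1.length < ladder.length then (ladder, st.2) else (st.1, st.2))
      (res, PySem.Set.empty)).1
    = l.foldl (fun res w =>
        let lad := pvDfsA d F w PySem.Set.empty
        if res.length < lad.length then lad else res) res := by
  intro l
  induction l with
  | nil => intro res; rfl
  | cons w t ih =>
    intro res
    simp only [List.foldl_cons, pvContains_empty, Bool.false_eq_true, if_false]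
    by_cases h : res.length < (pvDfsA d F w PySem.Set.empty).length
    · rw [if_pos h, if_pos h, ih]
    · rw [if_neg h, if_neg h, ih]

theorem pvEquiv (words : List String) :
    longest_ladder words = longest_ladder_alt words := by
  unfold longest_ladder longest_ladder_alt
  rw [pvPairFold]
  have hbest : ∀ x ∈ words,
      ((PySem.List.sorted words (fun w => (PySem.Str.len w : Int)) true).foldl
        (pvStepB (pvGroupB words)) PySem.Dict.empty).getD x [] =
      pvIdeal words (pvMaxLen words + 2) x := by
    apply pvFoldB
    · intro x hx; exact (PySem.List.mem_sorted _ _ _ _).mp hx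
    · have hp := PySem.List.sorted_pairwise_rev words (fun w => (PySem.Str.len w : Int))
      refine hp.imp ?_
      intro a b hab
      rw [PySem.Str.len_eq, PySem.Str.len_eq] at hab
      exact_mod_cast hab
    · intro x hx
      left
      exact (PySem.List.mem_sorted _ _ _ _).mpr hx
  apply PySem.List.foldl_congr_mem
  intro res w hw
  rw [hbest w hw, pvDfsA_eq_ideal words _ w PySem.Set.empty ?_]
  intro v hv
  simp [PySem.Set.empty] at hv

-- ===== VERDICT (by name: the statement is the Claim_ definition above) =====
theorem longest_ladder_spec : Claim_equal_longest_ladder := by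
  intro words _
  unfold Spec_longest_ladder
  exact pvEquiv words
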